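-- pv_equiv track=rewrite | github.com/XinyangZhu/KPI_Visualizer | Data-grabber/youtube_test.py | computeTotalViewsByDeviceType
-- ===== SOURCE A (Python) =====
-- def computeTotalViewsByDeviceType(rows):
--   desktop = 0
--   tv = 0
--   mobile = 0
--   tablet = 0
--   others = 0
--   for item in rows:
--     if item[1] == 'DESKTOP':
--       desktop += item[2]
--     elif item[1] == 'TV':
--       tv += item[2]
--     elif item[1] == 'MOBILE':
--       mobile += item[2]
--     elif item[1] == 'TABLET':
--       tablet += item[2]
--     else:
--       others += item[2]
--   return desktop, tv, mobile, tablet, others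
-- ===== SOURCE B (Python) =====
-- def computeTotalViewsByDeviceType(rows):
--   desktop = sum(item[2] for item in rows if item[1] == 'DESKTOP')
--   tv = sum(item[2] for item in rows if item[1] == 'TV')
--   mobile = sum(item[2] for item in rows if item[1] == 'MOBILE')
--   tablet = sum(item[2] for item in rows if item[1] == 'TABLET')
--   others = sum(item[2] for item in rows
--                if item[1] not in ('DESKTOP', 'TV', 'MOBILE', 'TABLET'))
--   return desktop, tv, mobile, tablet, others
-- ===== Notes on version B (the rewrite author's own statement) =====
-- stated objective: idiomatic
-- what changed: Replaces the single accumulator loop over a 5-tuple of mutable counters with five independent filtered sum() aggregations, one per device category.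
import Mathlib
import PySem

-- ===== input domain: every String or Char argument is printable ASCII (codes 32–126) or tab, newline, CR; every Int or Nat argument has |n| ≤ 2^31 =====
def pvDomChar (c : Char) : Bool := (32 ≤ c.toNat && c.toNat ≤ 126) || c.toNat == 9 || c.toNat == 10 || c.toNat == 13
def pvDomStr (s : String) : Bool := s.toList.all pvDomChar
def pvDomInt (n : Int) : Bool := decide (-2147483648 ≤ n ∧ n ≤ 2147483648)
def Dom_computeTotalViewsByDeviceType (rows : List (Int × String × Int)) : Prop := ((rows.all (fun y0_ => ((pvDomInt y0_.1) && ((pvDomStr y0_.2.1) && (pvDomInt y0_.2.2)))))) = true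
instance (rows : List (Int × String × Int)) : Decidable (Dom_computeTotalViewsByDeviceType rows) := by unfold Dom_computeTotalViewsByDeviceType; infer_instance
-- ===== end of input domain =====

-- B replaces A's single accumulator loop with five independent filtered sums (idiomatic rewrite; same O(n) cost).


-- ===== PORT A =====
def computeTotalViewsByDeviceType (rows : List (Int × String × Int)) : Int × Int × Int × Int × Int :=
  rows.foldl (fun (acc : Int × Int × Int × Int × Int) item =>
    let (desktop, tv, mobile, tablet, others) := acc
    if item.2.1 == "DESKTOP" then (desktop + item.2.2, tv, mobile, tablet, others)
    else if item.2.1 == "TV" then (desktop, tv + item.2.2, mobile, tablet, others)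
    else if item.2.1 == "MOBILE" then (desktop, tv, mobile + item.2.2, tablet, others)
    else if item.2.1 == "TABLET" then (desktop, tv, mobile, tablet + item.2.2, others)
    else (desktop, tv, mobile, tablet, others + item.2.2)) (0, 0, 0, 0, 0)

-- ===== PORT B =====
-- B: five independent filtered sums, one per category (idiomatic rewrite of A's single loop)
def sumWhere (rows : List (Int × String × Int)) (p : String → Bool) : Int :=
  ((rows.filter (fun item => p item.2.1)).map (fun item => item.2.2)).sum

def computeTotalViewsByDeviceType_alt (rows : List (Int × String × Int)) : Int × Int × Int × Int × Int :=
  (sumWhere rows (fun d => d == "DESKTOP"),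
   sumWhere rows (fun d => d == "TV"),
   sumWhere rows (fun d => d == "MOBILE"),
   sumWhere rows (fun d => d == "TABLET"),
   sumWhere rows (fun d => !(d == "DESKTOP" || d == "TV" || d == "MOBILE" || d == "TABLET")))

-- ===== PRECONDITION & SPEC =====
def Spec_computeTotalViewsByDeviceType (rows : List (Int × String × Int)) (out : Int × Int × Int × Int × Int) : Prop := out = computeTotalViewsByDeviceType_alt rows
instance (rows : List (Int × String × Int)) (out : Int × Int × Int × Int × Int) : Decidable (Spec_computeTotalViewsByDeviceType rows out) := by unfold Spec_computeTotalViewsByDeviceType; infer_instance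

-- ===== CLAIM (what is proved, stated in full; the proofs are below) =====
def Claim_equal_computeTotalViewsByDeviceType : Prop := ∀ (rows : List (Int × String × Int)), Dom_computeTotalViewsByDeviceType rows → Spec_computeTotalViewsByDeviceType rows (computeTotalViewsByDeviceType rows)

-- ===== LEMMAS AND PROOFS =====

-- ===== VERDICT (by name: the statement is the Claim_ definition above) =====
lemma sumWhere_cons (hd : Int × String × Int) (tl : List (Int × String × Int)) (p : String → Bool) :
    sumWhere (hd :: tl) p = (if p hd.2.1 then hd.2.2 else 0) + sumWhere tl p := by
  simp only [sumWhere, List.filter_cons]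
  split <;> simp

lemma foldl_eq_sums (rows : List (Int × String × Int)) (a b c d e : Int) :
    rows.foldl (fun (acc : Int × Int × Int × Int × Int) item =>
      let (desktop, tv, mobile, tablet, others) := acc
      if item.2.1 == "DESKTOP" then (desktop + item.2.2, tv, mobile, tablet, others)
      else if item.2.1 == "TV" then (desktop, tv + item.2.2, mobile, tablet, others)
      else if item.2.1 == "MOBILE" then (desktop, tv, mobile + item.2.2, tablet, others)
      else if item.2.1 == "TABLET" then (desktop, tv, mobile, tablet + item.2.2, others)
      else (desktop, tv, mobile, tablet, others + item.2.2)) (a, b, c, d, e)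
    = (a + sumWhere rows (fun s => s == "DESKTOP"),
       b + sumWhere rows (fun s => s == "TV"),
       c + sumWhere rows (fun s => s == "MOBILE"),
       d + sumWhere rows (fun s => s == "TABLET"),
       e + sumWhere rows (fun s => !(s == "DESKTOP" || s == "TV" || s == "MOBILE" || s == "TABLET"))) := by
  induction rows generalizing a b c d e with
  | nil => simp [sumWhere]
  | cons hd tl ih =>
    simp only [List.foldl_cons]
    by_cases h1 : hd.2.1 == "DESKTOP"
    · rw [if_pos h1, ih]
      simp [sumWhere_cons, eq_of_beq h1, add_assoc]
    · rw [if_neg h1]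
      by_cases h2 : hd.2.1 == "TV"
      · rw [if_pos h2, ih]
        simp [sumWhere_cons, eq_of_beq h2, add_assoc]
      · rw [if_neg h2]
        by_cases h3 : hd.2.1 == "MOBILE"
        · rw [if_pos h3, ih]
          simp [sumWhere_cons, eq_of_beq h3, add_assoc]
        · rw [if_neg h3]
          by_cases h4 : hd.2.1 == "TABLET"
          · rw [if_pos h4, ih]
            simp [sumWhere_cons, eq_of_beq h4, add_assoc]
          · rw [if_neg h4, ih]
            simp [sumWhere_cons, h1, h2, h3, h4, add_assoc]

theorem computeTotalViewsByDeviceType_spec : Claim_equal_computeTotalViewsByDeviceType := by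
  intro rows _
  unfold Spec_computeTotalViewsByDeviceType computeTotalViewsByDeviceType computeTotalViewsByDeviceType_alt
  rw [foldl_eq_sums]
  simp
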